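-- pv_equiv track=rewrite | github.com/GabiCasini/War-G5 | back/model/Manager_de_Cartas.py | validar_possivel_troca
-- ===== SOURCE A (Python) =====
-- def validar_possivel_troca(lista_de_cartas):
--     if len(lista_de_cartas) != 3:
--         return False
--
--     contagem = [0, 0, 0]
--     for i in lista_de_cartas:
--         if i[0] == "Coringa":
--             return True
--
--         if i[0] == "Círculo":
--             contagem[0] += 1
--
--         elif i[0] == "Quadrado":
--             contagem[1] += 1
--
--         else:
--             contagem[2] += 1
--
--     if contagem[0] == contagem[1] and contagem[1] == contagem[2]:
--         return True
--
--     elif contagem[0] == 3 or contagem[1] == 3 or contagem[2] == 3: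
--         return True
--
--     else:
--         return False
-- ===== SOURCE B (Python) =====
-- def validar_possivel_troca(lista_de_cartas):
--     if len(lista_de_cartas) != 3:
--         return False
--     naipes = [c[0] for c in lista_de_cartas]
--     if "Coringa" in naipes:
--         return True
--     cats = {n if n in ("Círculo", "Quadrado") else "outro" for n in naipes}
--     return len(cats) != 2
-- ===== Notes on version B (the rewrite author's own statement) =====
-- stated objective: simpler
-- what changed: Replaces the three-bucket tally loop and count comparisons with mapping each suit to a normalized category and testing the number of distinct categories (1 or 3, i.e. not 2).
-- outside the precondition, e.g. on validar_possivel_troca([['Coringa'], [], ['X']]): A returns True, B raises IndexError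
import Mathlib
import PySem

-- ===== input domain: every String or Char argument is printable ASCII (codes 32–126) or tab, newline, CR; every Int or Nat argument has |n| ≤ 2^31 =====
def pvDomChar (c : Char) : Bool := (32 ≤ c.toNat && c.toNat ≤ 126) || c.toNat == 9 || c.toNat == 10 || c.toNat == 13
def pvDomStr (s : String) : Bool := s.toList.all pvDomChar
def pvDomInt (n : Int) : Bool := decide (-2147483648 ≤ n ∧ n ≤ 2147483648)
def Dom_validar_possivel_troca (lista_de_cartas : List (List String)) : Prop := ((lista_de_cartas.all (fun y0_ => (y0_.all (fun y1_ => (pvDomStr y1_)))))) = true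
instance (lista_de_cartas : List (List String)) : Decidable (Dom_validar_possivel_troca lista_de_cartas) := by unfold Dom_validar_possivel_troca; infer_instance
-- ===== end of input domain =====

-- B replaces A's tally-and-compare-counts loop by a distinct-category-cardinality test (simpler); equal on Pre_.

-- ===== PORT A =====
-- A's for-loop with the 'contagem' list carried as three counters; 'none' head = IndexError, outside Pre_.
def vptLoopA : List (List String) → Int → Int → Int → Bool
  | [], c0, c1, c2 =>
    if c0 == c1 && c1 == c2 then true
    else if c0 == 3 || c1 == 3 || c2 == 3 then true
    else false
  | i :: rest, c0, c1, c2 =>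
    match PySem.List.pyGet? i 0 with
    | none => false
    | some h =>
      if h == "Coringa" then true
      else if h == "Círculo" then vptLoopA rest (c0 + 1) c1 c2
      else if h == "Quadrado" then vptLoopA rest c0 (c1 + 1) c2
      else vptLoopA rest c0 c1 (c2 + 1)

def validar_possivel_troca (lista_de_cartas : List (List String)) : Bool :=
  if lista_de_cartas.length ≠ 3 then false
  else vptLoopA lista_de_cartas 0 0 0

-- ===== PORT B =====
-- the comprehension [c[0] for c in lista_de_cartas]; none = IndexError, outside Pre_.
def headsOf : List (List String) → Option (List String)
  | [] => some []
  | c :: rest =>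
    match PySem.List.pyGet? c 0 with
    | none => none
    | some h =>
      match headsOf rest with
      | none => none
      | some hs => some (h :: hs)

def validar_possivel_troca_alt (lista_de_cartas : List (List String)) : Bool :=
  if lista_de_cartas.length ≠ 3 then false
  else
    match headsOf lista_de_cartas with
    | none => false
    | some naipes =>
      if naipes.contains "Coringa" then true
      else
        let cats : PySem.Set String :=
          PySem.Set.ofList (naipes.map (fun n =>
            if n == "Círculo" || n == "Quadrado" then n else "outro"))
        decide (cats.length ≠ 2)

-- ===== PRECONDITION & SPEC =====
-- Pre_ excludes 3-card lists containing an empty card: A raises IndexError on them unless its early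
-- return on a joker happens to skip the empty card (then A returns True while B's comprehension raises).
def Pre_validar_possivel_troca (lista_de_cartas : List (List String)) : Prop :=
  lista_de_cartas.length = 3 → ∀ c ∈ lista_de_cartas, c ≠ []
instance (lista_de_cartas : List (List String)) : Decidable (Pre_validar_possivel_troca lista_de_cartas) := by unfold Pre_validar_possivel_troca; infer_instance
def pvWitness_validar_possivel_troca : List (List String) := [["Quadrado"], ["Quadrado"], ["X"]]

def Spec_validar_possivel_troca (lista_de_cartas : List (List String)) (out : Bool) : Prop := out = validar_possivel_troca_alt lista_de_cartas
instance (lista_de_cartas : List (List String)) (out : Bool) : Decidable (Spec_validar_possivel_troca lista_de_cartas out) := by unfold Spec_validar_possivel_troca; infer_instance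

-- ===== CLAIM (what is proved, stated in full; the proofs are below) =====
def Claim_equal_validar_possivel_troca : Prop := ∀ (lista_de_cartas : List (List String)), Dom_validar_possivel_troca lista_de_cartas → Pre_validar_possivel_troca lista_de_cartas → Spec_validar_possivel_troca lista_de_cartas (validar_possivel_troca lista_de_cartas)

-- ===== LEMMAS AND PROOFS =====
-- abstraction: each suit string falls in one of four classes (joker / circle / square / other);
-- both ports factor through the class, so the 3-card case reduces to a decidable check over Fin 4 triples.
def clsS (s : String) : Fin 4 :=
  if s = "Coringa" then 0 else if s = "Círculo" then 1 else if s = "Quadrado" then 2 else 3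

def catRep : Fin 4 → String
  | 0 => "outro"
  | 1 => "Círculo"
  | 2 => "Quadrado"
  | 3 => "outro"

lemma dec_coringa (s : String) : decide (s = "Coringa") = (clsS s == 0) := by
  unfold clsS; split_ifs <;> simp_all

lemma dec_circ (s : String) : decide (s = "Círculo") = (clsS s == 1) := by
  unfold clsS; split_ifs <;> simp_all

lemma dec_quad (s : String) : decide (s = "Quadrado") = (clsS s == 2) := by
  unfold clsS; split_ifs <;> simp_all

lemma coringa_dec (s : String) : decide ("Coringa" = s) = decide (s = "Coringa") := by
  rw [decide_eq_decide]; exact eq_comm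

lemma clsS_ne_one (s : String) (h : s ≠ "Círculo") : clsS s ≠ 1 := by
  unfold clsS; split_ifs <;> simp_all

lemma clsS_ne_two (s : String) (h : s ≠ "Quadrado") : clsS s ≠ 2 := by
  unfold clsS; split_ifs <;> simp_all

lemma if_circ {α : Type} (s : String) (t e : α) :
    (if s = "Círculo" then t else e) = (if clsS s = 1 then t else e) := by
  by_cases h : s = "Círculo"
  · subst h; simp [clsS]
  · simp [h, clsS_ne_one s h]

lemma if_quad {α : Type} (s : String) (t e : α) :
    (if s = "Quadrado" then t else e) = (if clsS s = 2 then t else e) := by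
  by_cases h : s = "Quadrado"
  · subst h; simp [clsS]
  · simp [h, clsS_ne_two s h]

lemma cat_if (s : String) :
    (if s = "Círculo" ∨ s = "Quadrado" then s else "outro") = catRep (clsS s) := by
  unfold clsS; split_ifs <;> simp_all [catRep]

-- ===== VERDICT (by name: the statement is the Claim_ definition above) =====
theorem validar_possivel_troca_spec : Claim_equal_validar_possivel_troca := by
  intro l hdom hpre
  clear hdom
  unfold Spec_validar_possivel_troca
  rcases l with _ | ⟨x, _ | ⟨y, _ | ⟨z, _ | ⟨d, t⟩⟩⟩⟩
  · rfl
  · rfl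
  · rfl
  case cons.cons.cons.nil =>
    have hx : x ≠ [] := hpre rfl x (by simp)
    have hy : y ≠ [] := hpre rfl y (by simp)
    have hz : z ≠ [] := hpre rfl z (by simp)
    clear hpre
    obtain ⟨hx0, xt, rfl⟩ := List.exists_cons_of_ne_nil hx
    obtain ⟨hy0, yt, rfl⟩ := List.exists_cons_of_ne_nil hy
    obtain ⟨hz0, zt, rfl⟩ := List.exists_cons_of_ne_nil hz
    clear hx hy hz
    simp only [validar_possivel_troca, validar_possivel_troca_alt, vptLoopA, headsOf,
      PySem.List.pyGet?_zero_cons, List.length_cons, List.length_nil,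
      List.contains_cons, List.contains_nil, List.map_cons, List.map_nil]
    norm_num
    simp only [cat_if, if_circ, if_quad, coringa_dec, dec_coringa, dec_circ, dec_quad]
    generalize clsS hx0 = a
    generalize clsS hy0 = b
    generalize clsS hz0 = c
    revert a b c
    decide
  · rfl
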